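-- pv_equiv track=rewrite | github.com/Reddysekhar8333/dsa-problems | Arrays/generate_all_subarrays.py | generate_subarrays
-- ===== SOURCE A (Python) =====
-- def generate_subarrays(arr):
--     n = len(arr)
--     subarrays = []
--
--     # Outer loop: Start index
--     for start in range(n):
--         subarray = []
--         # Inner loop: End index
--         for end in range(start, n):
--             subarray.append(arr[end])  # Extend subarray dynamically
--             subarrays.append(subarray[:])  # Store a copy
--
--     return subarrays
-- ===== SOURCE B (Python) =====
-- def generate_subarrays(arr):
--     # Recursive decomposition: the subarrays of arr are the non-empty prefixes
--     # of arr (built directly by slicing) followed by the subarrays of arr[1:].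
--     if len(arr) == 0:
--         return []
--     return [list(arr[:k]) for k in range(1, len(arr) + 1)] + generate_subarrays(arr[1:])
-- ===== Notes on version B (the rewrite author's own statement) =====
-- stated objective: alternative
-- what changed: Replaces A's two nested index loops with a mutable running prefix and explicit copying by a recursive decomposition: the subarrays of arr are its non-empty prefixes (each built directly by slicing) followed by the subarrays of arr[1:].
import Mathlib
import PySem

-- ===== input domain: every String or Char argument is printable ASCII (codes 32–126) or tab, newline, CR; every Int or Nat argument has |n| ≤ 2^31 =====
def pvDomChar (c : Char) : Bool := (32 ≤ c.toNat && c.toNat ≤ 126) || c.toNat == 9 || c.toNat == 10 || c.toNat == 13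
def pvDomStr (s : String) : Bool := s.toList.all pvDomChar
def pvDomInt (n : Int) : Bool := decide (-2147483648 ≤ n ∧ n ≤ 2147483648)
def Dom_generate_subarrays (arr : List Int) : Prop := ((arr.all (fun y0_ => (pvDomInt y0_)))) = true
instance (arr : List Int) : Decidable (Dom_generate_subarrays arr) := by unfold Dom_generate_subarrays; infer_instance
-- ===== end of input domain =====

-- B replaces A's nested loops with a running accumulator by a recursive decomposition
-- (non-empty prefixes built by slicing, then recurse on the tail); objective: alternative.

-- ===== PORT A =====
-- arr[end] is always in range (start ≤ end < n), so pyGetD's default is never used.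
def generate_subarrays (arr : List Int) : List (List Int) :=
  let n : Int := arr.length
  (PySem.List.pyRange 0 n 1).foldl
    (fun subarrays start =>
      ((PySem.List.pyRange start n 1).foldl
        (fun (st : List Int × List (List Int)) e =>
          let sub := st.1 ++ [PySem.List.pyGetD arr e 0]
          (sub, st.2 ++ [sub]))
        ([], subarrays)).2)
    []

-- ===== PORT B =====
def generate_subarrays_alt (arr : List Int) : List (List Int) :=
  if _h : arr.length = 0 then []
  else
    ((PySem.List.pyRange 1 ((arr.length : Int) + 1) 1).map
        (fun k => PySem.List.slice arr none (some k)))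
      ++ generate_subarrays_alt (PySem.List.slice arr (some 1) none)
termination_by arr.length
decreasing_by
  rw [PySem.List.slice_from_one]
  simp only [List.length_tail]
  omega

-- ===== PRECONDITION & SPEC =====
def Spec_generate_subarrays (arr : List Int) (out : List (List Int)) : Prop := out = generate_subarrays_alt arr
instance (arr : List Int) (out : List (List Int)) : Decidable (Spec_generate_subarrays arr out) := by unfold Spec_generate_subarrays; infer_instance

-- ===== CLAIM (what is proved, stated in full; the proofs are below) =====
def Claim_equal_generate_subarrays : Prop := ∀ (arr : List Int), Dom_generate_subarrays arr → Spec_generate_subarrays arr (generate_subarrays arr)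

-- ===== LEMMAS AND PROOFS =====

/-- The non-empty prefixes of a list, in increasing length order. -/
def nprefs : List Int → List (List Int)
  | [] => []
  | a :: t => [a] :: (nprefs t).map (a :: ·)

theorem nprefs_eq_map_take (l : List Int) :
    nprefs l = (List.range l.length).map (fun k => l.take (k + 1)) := by
  induction l with
  | nil => simp [nprefs]
  | cons a t ih =>
      simp [nprefs, ih, List.range_succ_eq_map, List.map_map, Function.comp]

/-- A's inner loop: fold of the append-and-copy step over the remaining elements. -/
theorem foldl_step (l pre : List Int) (acc : List (List Int)) :
    l.foldl (fun (st : List Int × List (List Int)) v =>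
        (st.1 ++ [v], st.2 ++ [st.1 ++ [v]])) (pre, acc)
      = (pre ++ l, acc ++ (nprefs l).map (pre ++ ·)) := by
  induction l generalizing pre acc with
  | nil => simp [nprefs]
  | cons a t ih =>
      simp only [List.foldl_cons, ih, nprefs, List.map_cons, List.map_map]
      refine Prod.ext (by simp) ?_
      simp [Function.comp, List.append_assoc]

theorem pvPrefixes_eq (l : List Int) :
    (PySem.List.pyRange 1 ((l.length : Int) + 1) 1).map
        (fun k => PySem.List.slice l none (some k)) = nprefs l := by
  rw [nprefs_eq_map_take, PySem.List.pyRange_one]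
  have h : ((l.length : Int) + 1 - 1).toNat = l.length := by omega
  rw [h, List.map_map]
  refine List.map_congr_left ?_
  intro k hk
  simp only [Function.comp]
  have h2 : (1 : Int) + (k : Int) = ((k + 1 : Nat) : Int) := by push_cast; ring
  rw [h2, PySem.List.slice_to_natCast]

theorem flatMap_nprefs_drop (arr : List Int) :
    (List.range arr.length).flatMap (fun k => nprefs (arr.drop k))
      = generate_subarrays_alt arr := by
  induction arr with
  | nil => simp [generate_subarrays_alt]
  | cons a t ih =>
      rw [generate_subarrays_alt]
      simp only [List.length_cons, List.range_succ_eq_map, List.flatMap_cons,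
        List.flatMap_map, List.drop_zero, PySem.List.slice_from_one]
      have h1 : (List.range t.length).flatMap (fun k => nprefs ((a :: t).drop (k + 1)))
          = generate_subarrays_alt t := by
        rw [← ih]; exact List.flatMap_congr (by intro k _; simp)
      rw [h1, ← pvPrefixes_eq (a :: t)]
      simp

theorem generate_subarrays_spec : Claim_equal_generate_subarrays := by
  intro arr _
  unfold Spec_generate_subarrays generate_subarrays
  have hcongr : ∀ (acc : List (List Int)) (s : Int),
      s ∈ PySem.List.pyRange 0 ((arr.length : Int)) 1 →
      ((PySem.List.pyRange s ((arr.length : Int)) 1).foldl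
        (fun (st : List Int × List (List Int)) e =>
          let sub := st.1 ++ [PySem.List.pyGetD arr e 0]
          (sub, st.2 ++ [sub])) ([], acc)).2
        = acc ++ nprefs (arr.drop s.toNat) := by
    intro acc s hs
    have h0 : 0 ≤ s := (PySem.List.mem_pyRange_one.mp hs).1
    rw [PySem.List.foldl_pyRange_pyGetD' (f := fun (st : List Int × List (List Int)) v =>
      (st.1 ++ [v], st.2 ++ [st.1 ++ [v]])) (d := 0) (init := ([], acc)) arr h0]
    rw [foldl_step]
    simp
  show (PySem.List.pyRange 0 ((arr.length : Int)) 1).foldl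
      (fun subarrays start =>
        ((PySem.List.pyRange start ((arr.length : Int)) 1).foldl
          (fun (st : List Int × List (List Int)) e =>
            let sub := st.1 ++ [PySem.List.pyGetD arr e 0]
            (sub, st.2 ++ [sub])) ([], subarrays)).2) []
      = generate_subarrays_alt arr
  refine Eq.trans (PySem.List.foldl_congr_mem _ _ _ _ hcongr) ?_
  rw [PySem.List.foldl_append_eq_flatMap]
  rw [PySem.List.pyRange_zero_nat]
  rw [List.flatMap_map]
  rw [← flatMap_nprefs_drop]
  simp
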